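-- pv_equiv track=rewrite | github.com/Rarn1k/hello-world | Deep Learning Base/4.1/4.1_4.py | cumsum_and_erase
-- ===== SOURCE A (Python) =====
-- def cumsum_and_erase(A, erase=1):
--     """
--     сформировать массив B[0,…,N−1], где B_i = A_0 + ... + A_i-- массив частичных сумм массива A;
--     удалить из массива B все элементы, равные параметру erase; получить массив C;
--     вернуть C в качестве ответа
--     :param A: массив A[0,…,N−1].
--     :param erase: опциональный аргумент, по умолчанию равный 1.
--     :return: массив С
--     """
--     B = []
--     sum = 0
--     for i in range(len(A)):
--         sum += A[i]
--         B.append(sum)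
--     C = [i for i in B if i != erase]
--     return C
-- ===== SOURCE B (Python) =====
-- def cumsum_and_erase(A, erase=1):
--     # Backward reconstruction: each prefix sum equals total minus the suffix sum
--     # after it, so one reverse pass rebuilds them from the end, collecting the
--     # surviving values back-to-front; no forward running prefix sum is kept.
--     total = sum(A)
--     C = []
--     tail = 0
--     for x in reversed(A):
--         s = total - tail
--         if s != erase:
--             C.append(s)
--         tail += x
--     C.reverse()
--     return C
-- ===== Notes on version B (the rewrite author's own statement) =====
-- stated objective: alternative
-- what changed: Instead of accumulating prefix sums left-to-right and filtering, B sums the whole list once and then walks A backwards, reconstructing each prefix sum as total minus the suffix sum seen so far, building the filtered output back-to-front and reversing it at the end.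
import Mathlib
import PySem

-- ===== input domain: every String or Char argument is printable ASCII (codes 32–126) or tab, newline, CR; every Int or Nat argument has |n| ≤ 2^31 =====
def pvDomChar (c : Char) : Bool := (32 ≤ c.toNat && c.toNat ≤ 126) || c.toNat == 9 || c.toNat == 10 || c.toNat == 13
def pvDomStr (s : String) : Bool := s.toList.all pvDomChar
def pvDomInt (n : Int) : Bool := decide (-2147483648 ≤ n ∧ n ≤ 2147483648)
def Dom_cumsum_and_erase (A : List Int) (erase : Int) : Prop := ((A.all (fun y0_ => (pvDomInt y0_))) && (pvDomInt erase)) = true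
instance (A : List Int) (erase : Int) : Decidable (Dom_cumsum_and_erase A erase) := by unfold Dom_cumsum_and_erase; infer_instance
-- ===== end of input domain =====

-- B replaces A's forward prefix-sum accumulation + filter by a total-first backward pass:
-- each prefix sum is reconstructed as total minus the suffix sum, output built back-to-front.

-- ===== PORT A =====
-- index loop building B with a running sum, then the filtering comprehension
def cumsum_and_erase (A : List Int) (erase : Int) : List Int :=
  let st := (PySem.List.pyRange 0 A.length 1).foldl
    (fun (st : List Int × Int) i =>
      let s := st.2 + PySem.List.pyGetD A i 0
      (st.1 ++ [s], s)) ([], 0)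
  st.1.filter (fun i => i != erase)

-- ===== PORT B =====
-- total = sum(A); backward pass over reversed(A) with suffix sum 'tail'; final reverse
def cumsum_and_erase_alt (A : List Int) (erase : Int) : List Int :=
  let total := A.foldl (· + ·) 0
  let st := A.reverse.foldl
    (fun (st : List Int × Int) x =>
      let s := total - st.2
      (if s != erase then st.1 ++ [s] else st.1, st.2 + x)) ([], 0)
  st.1.reverse

-- ===== PRECONDITION & SPEC =====
def Spec_cumsum_and_erase (A : List Int) (erase : Int) (out : List Int) : Prop := out = cumsum_and_erase_alt A erase
instance (A : List Int) (erase : Int) (out : List Int) : Decidable (Spec_cumsum_and_erase A erase out) := by unfold Spec_cumsum_and_erase; infer_instance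

-- ===== CLAIM (what is proved, stated in full; the proofs are below) =====
def Claim_equal_cumsum_and_erase : Prop := ∀ (A : List Int) (erase : Int), Dom_cumsum_and_erase A erase → Spec_cumsum_and_erase A erase (cumsum_and_erase A erase)

-- ===== LEMMAS AND PROOFS =====

-- inclusive prefix sums starting from s (the values A's loop appends)
def psums (s : Int) : List Int → List Int
  | [] => []
  | x :: xs => (s + x) :: psums (s + x) xs

-- exclusive prefix sums starting from t (the values of 'tail' B's loop reads)
def esums (t : Int) : List Int → List Int
  | [] => []
  | x :: xs => t :: esums (t + x) xs

theorem foldA (A : List Int) : ∀ (s : Int) (acc : List Int),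
    (A.foldl (fun (st : List Int × Int) x => (st.1 ++ [st.2 + x], st.2 + x)) (acc, s)).1
      = acc ++ psums s A := by
  induction A with
  | nil => intro s acc; simp [psums]
  | cons x xs ih => intro s acc; simp [psums, ih (s + x) (acc ++ [s + x])]

theorem foldB (total erase : Int) (L : List Int) : ∀ (t : Int) (acc : List Int),
    (L.foldl (fun (st : List Int × Int) x =>
        (if total - st.2 != erase then st.1 ++ [total - st.2] else st.1, st.2 + x)) (acc, t)).1
      = acc ++ ((esums t L).map (fun q => total - q)).filter (fun i => i != erase) := by
  induction L with
  | nil => intro t acc; simp [esums]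
  | cons x xs ih =>
    intro t acc
    simp only [List.foldl_cons, esums, List.map_cons, List.filter_cons]
    rw [ih (t + x)]
    by_cases h : total - t = erase <;> simp [h]

theorem esums_append_single (L : List Int) : ∀ (t x : Int),
    esums t (L ++ [x]) = esums t L ++ [t + L.sum] := by
  induction L with
  | nil => intro t x; simp [esums]
  | cons y ys ih => intro t x; simp [esums, ih (t + y) x]; ring

-- total minus the exclusive suffix sums of reversed A = reversed inclusive prefix sums
theorem map_sub_esums_reverse (A : List Int) : ∀ (c : Int),
    ((esums 0 A.reverse).map (fun q => c - q)) = (psums (c - A.sum) A).reverse := by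
  induction A with
  | nil => intro c; simp [esums, psums]
  | cons x xs ih =>
    intro c
    simp only [List.reverse_cons, psums]
    rw [esums_append_single, List.map_append]
    simp only [List.map_cons, List.map_nil]
    rw [ih c]
    have h1 : c - (x :: xs).sum + x = c - xs.sum := by simp; ring
    have h2 : c - (0 + xs.reverse.sum) = c - xs.sum := by simp
    rw [h1, h2]

theorem foldl_add_eq_sum (L : List Int) : ∀ (a : Int), L.foldl (· + ·) a = a + L.sum := by
  induction L with
  | nil => intro a; simp
  | cons x xs ih => intro a; simp [ih]; ring

theorem cumsum_and_erase_eq (A : List Int) (erase : Int) :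
    cumsum_and_erase A erase = cumsum_and_erase_alt A erase := by
  unfold cumsum_and_erase cumsum_and_erase_alt
  show (((PySem.List.pyRange 0 (A.length : Int) 1).foldl
      (fun (st : List Int × Int) i => (st.1 ++ [st.2 + PySem.List.pyGetD A i 0], st.2 + PySem.List.pyGetD A i 0))
      ([], 0)).1).filter (fun i => i != erase)
    = ((A.reverse.foldl
        (fun (st : List Int × Int) x =>
          (if A.foldl (· + ·) 0 - st.2 != erase then st.1 ++ [A.foldl (· + ·) 0 - st.2] else st.1, st.2 + x))
        ([], 0)).1).reverse
  rw [PySem.List.foldl_pyRange_zero_pyGetD' A 0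
      (fun (st : List Int × Int) x => (st.1 ++ [st.2 + x], st.2 + x)) ([], 0)]
  simp only [foldA A 0 [], List.nil_append, foldl_add_eq_sum, Int.zero_add]
  rw [foldB A.sum erase A.reverse 0 [], map_sub_esums_reverse A A.sum]
  simp

-- ===== VERDICT (by name: the statement is the Claim_ definition above) =====
theorem cumsum_and_erase_spec : Claim_equal_cumsum_and_erase := by
  intro A erase _
  exact cumsum_and_erase_eq A erase
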